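-- pv_equiv track=rewrite | github.com/TonyDeRosia/adventurers_guild_ai | memory/campaign_state_orchestrator.py | _category_for_item
-- ===== SOURCE A (Python) =====
-- def _category_for_item(item_id: str) -> str:
--     lowered = str(item_id or "").lower()
--     if any(token in lowered for token in ["sword", "blade", "bow", "axe", "staff"]):
--         return "weapons"
--     if any(token in lowered for token in ["armor", "shield", "helm", "mail"]):
--         return "armor"
--     if any(token in lowered for token in ["draught", "potion", "elixir"]):
--         return "consumables"
--     if any(token in lowered for token in ["key", "sigil", "relic", "lantern"]):
--         return "key_items"
--     return "items"
-- ===== SOURCE B (Python) =====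
-- _TOKEN_RANK = {
--     "sword": 0, "blade": 0, "bow": 0, "axe": 0, "staff": 0,
--     "armor": 1, "shield": 1, "helm": 1, "mail": 1,
--     "draught": 2, "potion": 2, "elixir": 2,
--     "key": 3, "sigil": 3, "relic": 3, "lantern": 3,
-- }
-- _NAMES = ["weapons", "armor", "consumables", "key_items", "items"]
--
-- def _category_for_item(item_id: str) -> str:
--     lowered = str(item_id or "").lower()
--     best = 4
--     for tok, rank in _TOKEN_RANK.items():
--         if rank < best and tok in lowered:
--             best = rank
--     return _NAMES[best]
-- ===== Notes on version B (the rewrite author's own statement) =====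
-- stated objective: alternative
-- what changed: Replaces the four-branch early-return chain of any()-scans with a single flat token-to-rank map folded once to the minimum matching rank, then a table lookup for the name.
import Mathlib
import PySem

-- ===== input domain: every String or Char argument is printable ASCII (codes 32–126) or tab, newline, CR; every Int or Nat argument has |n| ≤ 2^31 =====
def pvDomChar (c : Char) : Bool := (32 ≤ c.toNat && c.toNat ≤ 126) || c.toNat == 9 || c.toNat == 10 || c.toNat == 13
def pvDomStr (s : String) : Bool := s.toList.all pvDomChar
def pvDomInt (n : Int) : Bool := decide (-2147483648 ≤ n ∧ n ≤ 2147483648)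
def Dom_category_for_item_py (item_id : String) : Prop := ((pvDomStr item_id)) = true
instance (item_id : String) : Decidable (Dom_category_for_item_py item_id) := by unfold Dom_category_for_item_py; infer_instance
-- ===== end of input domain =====

-- B replaces A's early-return chain of any()-scans with a flat token→rank map folded to the minimum matching rank (alternative decomposition, same cost).


-- ===== PORT A =====
def category_for_item_py (item_id : String) : String :=
  let lowered := PySem.Str.lower (if item_id == "" then "" else item_id)
  if (["sword", "blade", "bow", "axe", "staff"]).any (fun token => PySem.Str.isIn token lowered) then "weapons"
  else if (["armor", "shield", "helm", "mail"]).any (fun token => PySem.Str.isIn token lowered) then "armor"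
  else if (["draught", "potion", "elixir"]).any (fun token => PySem.Str.isIn token lowered) then "consumables"
  else if (["key", "sigil", "relic", "lantern"]).any (fun token => PySem.Str.isIn token lowered) then "key_items"
  else "items"

-- ===== PORT B =====
def pvTokenRank : List (String × Nat) :=
  [("sword", 0), ("blade", 0), ("bow", 0), ("axe", 0), ("staff", 0),
   ("armor", 1), ("shield", 1), ("helm", 1), ("mail", 1),
   ("draught", 2), ("potion", 2), ("elixir", 2),
   ("key", 3), ("sigil", 3), ("relic", 3), ("lantern", 3)]

def pvNames : List String := ["weapons", "armor", "consumables", "key_items", "items"]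

def category_for_item_py_alt (item_id : String) : String :=
  let lowered := PySem.Str.lower (if item_id == "" then "" else item_id)
  let best := pvTokenRank.foldl
    (fun best p => if p.2 < best ∧ PySem.Str.isIn p.1 lowered = true then p.2 else best) 4
  pvNames.getD best "items"

-- ===== PRECONDITION & SPEC =====
def Spec_category_for_item_py (item_id : String) (out : String) : Prop := out = category_for_item_py_alt item_id
instance (item_id : String) (out : String) : Decidable (Spec_category_for_item_py item_id out) := by unfold Spec_category_for_item_py; infer_instance

-- ===== CLAIM (what is proved, stated in full; the proofs are below) =====
def Claim_equal_category_for_item_py : Prop := ∀ (item_id : String), Dom_category_for_item_py item_id → Spec_category_for_item_py item_id (category_for_item_py item_id)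

-- ===== LEMMAS AND PROOFS =====

-- If no pair's rank is below the accumulator, B's fold leaves the accumulator unchanged.
theorem pv_stay (lw : String) (b : Nat) (ps : List (String × Nat)) (h : ∀ p ∈ ps, b ≤ p.2) :
    ps.foldl (fun best p => if p.2 < best ∧ PySem.Str.isIn p.1 lw = true then p.2 else best) b = b := by
  induction ps with
  | nil => rfl
  | cons p ps ih =>
    have hb : ¬ (p.2 < b ∧ PySem.Str.isIn p.1 lw = true) :=
      fun hc => (not_lt.mpr (h p List.mem_cons_self)) hc.1
    simp only [List.foldl_cons]
    rw [if_neg hb]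
    exact ih (fun q hq => h q (List.mem_cons_of_mem _ hq))

-- A whole group of tokens of one rank r < b folds to r iff some token matches, else keeps b.
theorem pv_group (lw : String) (r b : Nat) (toks : List String) (h : r < b) :
    (toks.map (fun t => (t, r))).foldl
      (fun best p => if p.2 < best ∧ PySem.Str.isIn p.1 lw = true then p.2 else best) b
    = if (toks.any fun token => PySem.Str.isIn token lw) = true then r else b := by
  induction toks with
  | nil => simp
  | cons t ts ih =>
    simp only [List.map_cons, List.foldl_cons, List.any_cons, Bool.or_eq_true]
    by_cases ht : PySem.Str.isIn t lw = true
    · rw [if_pos (show r < b ∧ PySem.Str.isIn t lw = true from ⟨h, ht⟩),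
        pv_stay lw r _ (fun p hp => by obtain ⟨x, _, rfl⟩ := List.mem_map.mp hp; exact Nat.le_refl r),
        if_pos (Or.inl ht)]
    · rw [if_neg (show ¬ (r < b ∧ PySem.Str.isIn t lw = true) from fun hc => ht hc.2), ih]
      by_cases hts : (ts.any fun token => PySem.Str.isIn token lw) = true
      · rw [if_pos hts, if_pos (Or.inr hts)]
      · rw [if_neg hts, if_neg (fun hor => hor.elim (fun h1 => ht h1) (fun h2 => hts h2))]

-- The chain of A equals B's fold-and-lookup, for any lowered string lw.
theorem pv_core (lw : String) :
    (if (["sword", "blade", "bow", "axe", "staff"]).any (fun token => PySem.Str.isIn token lw) then "weapons"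
     else if (["armor", "shield", "helm", "mail"]).any (fun token => PySem.Str.isIn token lw) then "armor"
     else if (["draught", "potion", "elixir"]).any (fun token => PySem.Str.isIn token lw) then "consumables"
     else if (["key", "sigil", "relic", "lantern"]).any (fun token => PySem.Str.isIn token lw) then "key_items"
     else "items")
    = pvNames.getD
        (pvTokenRank.foldl (fun best p => if p.2 < best ∧ PySem.Str.isIn p.1 lw = true then p.2 else best) 4)
        "items" := by
  have hsplit : pvTokenRank =
      ((["sword", "blade", "bow", "axe", "staff"].map (fun t => (t, 0))) ++
       (["armor", "shield", "helm", "mail"].map (fun t => (t, 1))) ++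
       (["draught", "potion", "elixir"].map (fun t => (t, 2)))) ++
      (["key", "sigil", "relic", "lantern"].map (fun t => (t, 3))) := rfl
  rw [hsplit, List.foldl_append, List.foldl_append, List.foldl_append]
  rw [pv_group lw 0 4 ["sword", "blade", "bow", "axe", "staff"] (by norm_num)]
  by_cases hw : (["sword", "blade", "bow", "axe", "staff"].any fun token => PySem.Str.isIn token lw) = true
  · rw [if_pos hw, if_pos hw,
      pv_stay lw 0 _ (fun p _ => Nat.zero_le _),
      pv_stay lw 0 _ (fun p _ => Nat.zero_le _),
      pv_stay lw 0 _ (fun p _ => Nat.zero_le _)]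
    rfl
  · rw [if_neg hw, if_neg hw, pv_group lw 1 4 ["armor", "shield", "helm", "mail"] (by norm_num)]
    by_cases ha : (["armor", "shield", "helm", "mail"].any fun token => PySem.Str.isIn token lw) = true
    · rw [if_pos ha, if_pos ha,
        pv_stay lw 1 _ (fun p hp => by obtain ⟨x, _, rfl⟩ := List.mem_map.mp hp; norm_num),
        pv_stay lw 1 _ (fun p hp => by obtain ⟨x, _, rfl⟩ := List.mem_map.mp hp; norm_num)]
      rfl
    · rw [if_neg ha, if_neg ha, pv_group lw 2 4 ["draught", "potion", "elixir"] (by norm_num)]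
      by_cases hc : (["draught", "potion", "elixir"].any fun token => PySem.Str.isIn token lw) = true
      · rw [if_pos hc, if_pos hc,
          pv_stay lw 2 _ (fun p hp => by obtain ⟨x, _, rfl⟩ := List.mem_map.mp hp; norm_num)]
        rfl
      · rw [if_neg hc, if_neg hc, pv_group lw 3 4 ["key", "sigil", "relic", "lantern"] (by norm_num)]
        by_cases hk : (["key", "sigil", "relic", "lantern"].any fun token => PySem.Str.isIn token lw) = true
        · rw [if_pos hk, if_pos hk]; rfl
        · rw [if_neg hk, if_neg hk]; rfl

theorem category_for_item_py_eq_alt (item_id : String) :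
    category_for_item_py item_id = category_for_item_py_alt item_id :=
  pv_core (PySem.Str.lower (if item_id == "" then "" else item_id))

-- ===== VERDICT (by name: the statement is the Claim_ definition above) =====
theorem category_for_item_py_spec : Claim_equal_category_for_item_py := by
  intro item_id _
  unfold Spec_category_for_item_py
  exact category_for_item_py_eq_alt item_id
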